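-- pv_equiv track=rewrite | github.com/thu-spmi/GUS | reader.py | get_exp_domains
-- ===== SOURCE A (Python) =====
-- def get_exp_domains(exp_domains, all_domains_list):
--     for domain in ['hotel', 'train', 'attraction', 'restaurant', 'taxi']:
--         if domain in exp_domains:
--             if 'except' in exp_domains:
--                 domains=[d for d in all_domains_list if domain not in d and 'multi' not in d]
--             else:
--                 domains=[domain+'_single', domain+'_multi']
--
--     return domains
-- ===== SOURCE B (Python) =====
-- def get_exp_domains(exp_domains, all_domains_list):
--     # Scan the candidate domain names from the rightmost (highest-priority) end
--     # and return as soon as one is present in exp_domains: this is the same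
--     # answer as A's last-match-wins overwrite loop, found without visiting the
--     # rest of the candidates and without rebuilding the result per match.
--     def pick(cands):
--         if not cands:
--             return None  # no candidate matched; A raises UnboundLocalError here
--         domain = cands[0]
--         if domain in exp_domains:
--             if 'except' in exp_domains:
--                 return [d for d in all_domains_list
--                         if domain not in d and 'multi' not in d]
--             return [domain + '_single', domain + '_multi']
--         return pick(cands[1:])
--
--     return pick(['taxi', 'restaurant', 'attraction', 'train', 'hotel'])
-- ===== Notes on version B (the rewrite author's own statement) =====
-- stated objective: alternative
-- what changed: A loops forward over all five candidates, overwriting `domains` on every match; B recurses over the candidates in reverse priority order and returns on the first hit, building the result exactly once.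
import Mathlib
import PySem

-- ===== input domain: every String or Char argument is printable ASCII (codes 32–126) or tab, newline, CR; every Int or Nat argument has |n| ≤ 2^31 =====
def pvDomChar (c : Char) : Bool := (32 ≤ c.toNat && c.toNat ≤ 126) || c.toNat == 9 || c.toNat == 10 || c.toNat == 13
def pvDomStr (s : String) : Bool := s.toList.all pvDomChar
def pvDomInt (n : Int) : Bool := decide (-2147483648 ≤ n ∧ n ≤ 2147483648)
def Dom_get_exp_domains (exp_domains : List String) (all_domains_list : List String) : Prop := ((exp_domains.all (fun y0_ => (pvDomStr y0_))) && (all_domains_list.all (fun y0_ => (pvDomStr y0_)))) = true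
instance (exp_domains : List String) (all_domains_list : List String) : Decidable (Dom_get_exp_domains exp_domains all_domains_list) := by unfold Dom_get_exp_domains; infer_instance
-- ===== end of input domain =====

-- B replaces A's overwrite-to-the-end forward loop by a recursive early-exit scan of the
-- candidates in reverse priority order, building the result once (objective: alternative).

-- ===== PORT A =====
-- A's loop over the five literal domain names; the accumulator is Python's local
-- `domains`: `none` = never assigned (Python raises UnboundLocalError at the return —
-- excluded by Pre_), `some` = the last assigned value.
def get_exp_domains (exp_domains : List String) (all_domains_list : List String) : List String :=
  (["hotel", "train", "attraction", "restaurant", "taxi"].foldl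
    (fun st domain =>
      if domain ∈ exp_domains then
        if "except" ∈ exp_domains then
          some (all_domains_list.filter
            (fun d => !(PySem.Str.isIn domain d) && !(PySem.Str.isIn "multi" d)))
        else
          some [domain ++ "_single", domain ++ "_multi"]
      else st)
    none).getD []

-- ===== PORT B =====
-- B's recursive helper `pick`: first hit wins, early return; [] stands for Python's
-- `None` on the no-match path (excluded by Pre_).
def pickDomain (exp_domains : List String) (all_domains_list : List String) : List String → List String
  | [] => []
  | domain :: rest =>
    if domain ∈ exp_domains then
      if "except" ∈ exp_domains then
        all_domains_list.filter
          (fun d => !(PySem.Str.isIn domain d) && !(PySem.Str.isIn "multi" d))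
      else
        [domain ++ "_single", domain ++ "_multi"]
    else pickDomain exp_domains all_domains_list rest

def get_exp_domains_alt (exp_domains : List String) (all_domains_list : List String) : List String :=
  pickDomain exp_domains all_domains_list ["taxi", "restaurant", "attraction", "train", "hotel"]

-- ===== PRECONDITION & SPEC =====
-- Pre_ excludes inputs in which none of the five domain names occurs: there A raises
-- UnboundLocalError (its `domains` is never assigned) and B returns None.
def Pre_get_exp_domains (exp_domains : List String) (all_domains_list : List String) : Prop :=
  "hotel" ∈ exp_domains ∨ "train" ∈ exp_domains ∨ "attraction" ∈ exp_domains ∨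
  "restaurant" ∈ exp_domains ∨ "taxi" ∈ exp_domains
instance (exp_domains : List String) (all_domains_list : List String) : Decidable (Pre_get_exp_domains exp_domains all_domains_list) := by unfold Pre_get_exp_domains; infer_instance
def pvWitness_get_exp_domains : List String × List String := (["except", "hotel"], ["hotel_single", "foo", "bar_multi"])

def Spec_get_exp_domains (exp_domains : List String) (all_domains_list : List String) (out : List String) : Prop := out = get_exp_domains_alt exp_domains all_domains_list
instance (exp_domains : List String) (all_domains_list : List String) (out : List String) : Decidable (Spec_get_exp_domains exp_domains all_domains_list out) := by unfold Spec_get_exp_domains; infer_instance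

-- ===== CLAIM (what is proved, stated in full; the proofs are below) =====
def Claim_equal_get_exp_domains : Prop := ∀ (exp_domains : List String) (all_domains_list : List String), Dom_get_exp_domains exp_domains all_domains_list → Pre_get_exp_domains exp_domains all_domains_list → Spec_get_exp_domains exp_domains all_domains_list (get_exp_domains exp_domains all_domains_list)

-- ===== LEMMAS AND PROOFS =====

-- ===== VERDICT (by name: the statement is the Claim_ definition above) =====
theorem get_exp_domains_spec : Claim_equal_get_exp_domains := by
  intro e a _ hpre
  unfold Spec_get_exp_domains get_exp_domains get_exp_domains_alt
  by_cases h1 : "hotel" ∈ e <;>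
  by_cases h2 : "train" ∈ e <;>
  by_cases h3 : "attraction" ∈ e <;>
  by_cases h4 : "restaurant" ∈ e <;>
  by_cases h5 : "taxi" ∈ e <;>
  by_cases h6 : "except" ∈ e <;>
  simp_all [Pre_get_exp_domains, pickDomain]
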